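-- pv_equiv track=rewrite | github.com/Matoone/o1-engineer | o1-eng.py | parse_edit_instructions
-- ===== SOURCE A (Python) =====
-- def parse_edit_instructions(response):
--     instructions = {}
--     current_file = None
--     current_instructions = []
--
--     for line in response.split("\n"):
--         if line.startswith("File: "):
--             if current_file:
--                 instructions[current_file] = "\n".join(current_instructions)
--             current_file = line[6:].strip()
--             current_instructions = []
--         elif line.strip() and current_file:
--             current_instructions.append(line.strip())
--
--     if current_file:
--         instructions[current_file] = "\n".join(current_instructions)
--
--     return instructions
-- ===== SOURCE B (Python) =====
-- def parse_edit_instructions(response):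
--     lines = response.split("\n")
--     header_idx = [i for i, l in enumerate(lines) if l.startswith("File: ")]
--     result = {}
--     for h, stop in zip(header_idx, header_idx[1:] + [len(lines)]):
--         name = lines[h][6:].strip()
--         if name:
--             body = [l.strip() for l in lines[h + 1:stop] if l.strip()]
--             result[name] = "\n".join(body)
--     return result
-- ===== Notes on version B (the rewrite author's own statement) =====
-- stated objective: alternative
-- what changed: Replaces A's single-pass flush-gate state machine (current_file/current_instructions with deferred flushes) by an explicit two-phase decomposition: first collect the indices of all header lines, then for each header slice the line segment up to the next header, clean it, and assign it into the dict.
import Mathlib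
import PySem

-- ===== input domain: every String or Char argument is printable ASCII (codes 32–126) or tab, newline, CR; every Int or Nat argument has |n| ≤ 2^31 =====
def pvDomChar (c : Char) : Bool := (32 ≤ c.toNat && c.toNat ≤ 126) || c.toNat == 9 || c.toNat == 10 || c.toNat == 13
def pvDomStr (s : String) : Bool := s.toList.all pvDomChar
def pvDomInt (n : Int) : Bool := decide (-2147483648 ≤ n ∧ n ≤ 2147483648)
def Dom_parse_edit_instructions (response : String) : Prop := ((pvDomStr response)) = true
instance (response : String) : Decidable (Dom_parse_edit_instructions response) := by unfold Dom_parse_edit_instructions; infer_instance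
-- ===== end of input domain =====

-- B replaces A's single-pass flush-gate state machine by a two-phase index-then-segment decomposition (find header indices, then slice and clean each segment); alternative structure, same cost.


-- ===== PORT A =====
-- shared atomic expressions of both Pythons: 'line.startswith("File: ")' and 'line[6:].strip()'
def isHdr (l : String) : Bool := PySem.Str.startswith l "File: "
def nameOf (l : String) : String := PySem.Str.strip (PySem.Str.slice l (some 6) none)

-- 'if current_file:' — Python truthiness: None and "" are falsy
def paTruthy (cf : Option String) : Bool :=
  match cf with
  | none => false
  | some f => f != ""

-- the guarded flush 'if current_file: instructions[current_file] = "\n".join(current_instructions)'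
def paFlush (ins : PySem.Dict String String) (cf : Option String) (ci : List String) :
    PySem.Dict String String :=
  if paTruthy cf then ins.insert (cf.getD "") (PySem.Str.join "\n" ci) else ins

-- 'for line in response.split("\n"):' with state (instructions, current_file, current_instructions)
def paLoop (ls : List String) (ins : PySem.Dict String String) (cf : Option String)
    (ci : List String) : PySem.Dict String String :=
  match ls with
  | [] => paFlush ins cf ci
  | line :: rest =>
    if isHdr line then
      paLoop rest (paFlush ins cf ci) (some (nameOf line)) []
    else if (PySem.Str.strip line != "") && paTruthy cf then
      paLoop rest ins cf (ci ++ [PySem.Str.strip line])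
    else
      paLoop rest ins cf ci

def parse_edit_instructions (response : String) : List (String × String) :=
  (paLoop ((PySem.Str.split? response "\n").getD []) PySem.Dict.empty none []).items

-- ===== PORT B =====
-- port of Source B: first pass records the header-line indices, second pass slices each segment
def parse_edit_instructions_alt (response : String) : List (String × String) :=
  let lines := (PySem.Str.split? response "\n").getD []
  let headerIdx : List Int :=
    (PySem.List.enumerate lines 0).filterMap
      (fun p => if isHdr p.2 then some p.1 else none)
  let result :=
    (headerIdx.zip (headerIdx.drop 1 ++ [(lines.length : Int)])).foldl
      (fun d p =>
        -- lines[h]: index is a recorded enumerate index, always in range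
        let name := nameOf ((PySem.List.pyGet? lines p.1).getD "")
        if name != "" then
          d.insert name (PySem.Str.join "\n"
            (((PySem.List.slice lines (some (p.1 + 1)) (some p.2)).filter
              (fun l => PySem.Str.strip l != "")).map PySem.Str.strip))
        else d)
      PySem.Dict.empty
  result.items

-- ===== PRECONDITION & SPEC =====
def Spec_parse_edit_instructions (response : String) (out : List (String × String)) : Prop := out = parse_edit_instructions_alt response
instance (response : String) (out : List (String × String)) : Decidable (Spec_parse_edit_instructions response out) := by unfold Spec_parse_edit_instructions; infer_instance

-- ===== CLAIM (what is proved, stated in full; the proofs are below) =====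
def Claim_equal_parse_edit_instructions : Prop := ∀ (response : String), Dom_parse_edit_instructions response → Spec_parse_edit_instructions response (parse_edit_instructions response)

-- ===== LEMMAS AND PROOFS =====
-- common normal form: the (header name, raw segment lines) groups and a fold over them
def bodies (ls : List String) : List String :=
  (ls.filter (fun l => PySem.Str.strip l != "")).map PySem.Str.strip

def groups : List String → List (String × List String)
  | [] => []
  | l :: ls =>
    if isHdr l then
      (nameOf l, ls.takeWhile (fun x => !isHdr x)) :: groups (ls.dropWhile (fun x => !isHdr x))
    else groups ls
  termination_by ls => ls.length
  decreasing_by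
  · simp only [List.length_cons]
    exact Nat.lt_succ_of_le (List.length_dropWhile_le _ _)
  · simp

def gStep (d : PySem.Dict String String) (g : String × List String) : PySem.Dict String String :=
  if g.1 != "" then d.insert g.1 (PySem.Str.join "\n" (bodies g.2)) else d

theorem groups_dropWhile (ls : List String) :
    groups (ls.dropWhile (fun x => !isHdr x)) = groups ls := by
  induction ls with
  | nil => rfl
  | cons l ls ih =>
    by_cases h : isHdr l
    · simp [h]
    · rw [List.dropWhile_cons]
      simp only [h, Bool.not_false, if_pos]
      rw [ih, groups]
      simp [h]

theorem paTruthy_some (f : String) : paTruthy (some f) = (f != "") := rfl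

-- A's loop computes the fold of gStep over the groups
set_option maxHeartbeats 1000000 in
theorem paLoop_eq (ls : List String) (ins : PySem.Dict String String) (cf : Option String)
    (ci : List String) :
    paLoop ls ins cf ci =
      (if paTruthy cf then
        (groups ls).foldl gStep
          (ins.insert (cf.getD "")
            (PySem.Str.join "\n" (ci ++ bodies (ls.takeWhile (fun x => !isHdr x)))))
      else (groups ls).foldl gStep ins) := by
  induction ls generalizing ins cf ci with
  | nil =>
    rw [show paLoop [] ins cf ci = paFlush ins cf ci from rfl]
    rw [show groups [] = [] from (by rw [groups])]
    rw [show List.takeWhile (fun x => !isHdr x) ([] : List String) = [] from rfl]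
    rw [show bodies ([] : List String) = [] from rfl, List.append_nil]
    unfold paFlush
    rfl
  | cons line rest ih =>
    rw [paLoop]
    by_cases h : isHdr line
    · rw [if_pos h, ih]
      have e1 : (line :: rest).takeWhile (fun x => !isHdr x) = [] := by
        rw [List.takeWhile_cons, if_neg]; simp [h]
      have e2 : groups (line :: rest)
          = (nameOf line, rest.takeWhile (fun x => !isHdr x)) :: groups rest := by
        rw [groups, if_pos h, groups_dropWhile]
      rw [e1, e2, paTruthy_some]
      have e3 : bodies ([] : List String) = [] := rfl
      rw [e3, List.append_nil]
      rw [show ((some (nameOf line)).getD "") = nameOf line from rfl]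
      rw [List.nil_append, List.foldl_cons, List.foldl_cons]
      by_cases hn : nameOf line != ""
      · rw [if_pos hn]
        have eg : ∀ X : PySem.Dict String String,
            gStep X (nameOf line, rest.takeWhile (fun x => !isHdr x))
              = X.insert (nameOf line)
                  (PySem.Str.join "\n" (bodies (rest.takeWhile (fun x => !isHdr x)))) := by
          intro X; unfold gStep; rw [if_pos hn]
        by_cases hc : paTruthy cf = true
        · rw [if_pos hc, eg]
          unfold paFlush; rw [if_pos hc]
        · rw [if_neg hc, eg]
          unfold paFlush; rw [if_neg hc]
      · rw [if_neg (by simpa using hn)]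
        have eg : ∀ X : PySem.Dict String String,
            gStep X (nameOf line, rest.takeWhile (fun x => !isHdr x)) = X := by
          intro X; unfold gStep; rw [if_neg (by simpa using hn)]
        by_cases hc : paTruthy cf = true
        · rw [if_pos hc, eg]
          unfold paFlush; rw [if_pos hc]
        · rw [if_neg hc, eg]
          unfold paFlush; rw [if_neg hc]
    · rw [if_neg h]
      have htw : List.takeWhile (fun x => !isHdr x) (line :: rest)
          = line :: List.takeWhile (fun x => !isHdr x) rest := by
        rw [List.takeWhile_cons, if_pos]; simp [h]
      have hg : groups (line :: rest) = groups rest := by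
        rw [groups, if_neg h]
      by_cases hb : PySem.Str.strip line != ""
      · by_cases hc : paTruthy cf = true
        · rw [if_pos (by simp [hb, hc]), ih]
          rw [htw, hg]
          rw [if_pos hc, if_pos hc]
          have hbod : bodies (line :: List.takeWhile (fun x => !isHdr x) rest)
              = PySem.Str.strip line :: bodies (List.takeWhile (fun x => !isHdr x) rest) := by
            unfold bodies; rw [List.filter_cons, if_pos hb, List.map_cons]
          rw [hbod]
          simp
        · rw [if_neg (by simp [hc]), ih]
          rw [if_neg hc, if_neg hc, hg]
      · rw [if_neg (by simp [hb]), ih, htw, hg]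
        have hbod : bodies (line :: List.takeWhile (fun x => !isHdr x) rest)
            = bodies (List.takeWhile (fun x => !isHdr x) rest) := by
          unfold bodies; rw [List.filter_cons, if_neg (by simpa using hb)]
        rw [hbod]

-- B side: the header indices as natural numbers and the index/slice segments
def hN : List String → List Nat
  | [] => []
  | l :: ls => (if isHdr l then [0] else []) ++ (hN ls).map (· + 1)

def natZip (lines : List String) : List (Nat × Nat) :=
  (hN lines).zip ((hN lines).drop 1 ++ [lines.length])

def natSeg (lines : List String) (p : Nat × Nat) : String × List String :=
  (nameOf (lines.getD p.1 ""), (lines.drop (p.1 + 1)).take (p.2 - (p.1 + 1)))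

theorem hN_lt (ls : List String) : ∀ n ∈ hN ls, n < ls.length := by
  induction ls with
  | nil => intro n h; simp [hN] at h
  | cons l ls ih =>
    intro n h
    rw [hN] at h
    rcases List.mem_append.mp h with h1 | h1
    · have : n = 0 := by
        by_cases hl : isHdr l
        · simpa [hl] using h1
        · simp [hl] at h1
      simp [this]
    · rcases List.mem_map.mp h1 with ⟨m, hm, rfl⟩
      have := ih m hm
      simp only [List.length_cons]
      omega

theorem enumerate_shift (xs : List String) (s : Int) :
    PySem.List.enumerate xs (s + 1) = (PySem.List.enumerate xs s).map (fun p => (p.1 + 1, p.2)) := by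
  induction xs generalizing s with
  | nil => simp [PySem.List.enumerate_nil]
  | cons x xs ih =>
    rw [PySem.List.enumerate_cons, PySem.List.enumerate_cons, List.map_cons, ih]

theorem hI_eq (ls : List String) :
    (PySem.List.enumerate ls 0).filterMap
        (fun p => if isHdr p.2 then some p.1 else none)
      = (hN ls).map (fun (n : Nat) => (n : Int)) := by
  induction ls with
  | nil => simp [PySem.List.enumerate_nil, hN]
  | cons l ls ih =>
    rw [PySem.List.enumerate_cons, enumerate_shift]
    have hcomp : ((fun p : Int × String => if isHdr p.2 then some p.1 else none) ∘
          (fun p : Int × String => (p.1 + 1, p.2)))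
        = fun p : Int × String =>
            ((if isHdr p.2 then some p.1 else none).map (fun n => n + 1)) := by
      funext p
      by_cases h : isHdr p.2 <;> simp [h, Function.comp]
    have tail : List.filterMap (fun p => if isHdr p.2 then some p.1 else none)
          ((PySem.List.enumerate ls 0).map (fun p : Int × String => (p.1 + 1, p.2)))
        = ((hN ls).map (fun (n : Nat) => (n : Int))).map (fun n => n + 1) := by
      rw [List.filterMap_map, hcomp, ← List.map_filterMap, ih]
    by_cases h : isHdr l
    · rw [List.filterMap_cons_some (b := (0 : Int)) (by simp [h]), tail, hN]
      simp only [h, if_true, List.singleton_append, List.map_cons, List.map_map]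
      refine congrArg₂ (· :: ·) rfl (List.map_congr_left ?_)
      intro a _
      simp only [Function.comp]
      push_cast
      ring
    · rw [List.filterMap_cons_none (by simp [h]), tail, hN]
      simp only [h, if_false, Bool.false_eq_true, List.nil_append, List.map_map]
      refine List.map_congr_left ?_
      intro a _
      simp only [Function.comp]
      push_cast
      ring

theorem natSeg_shift (l : String) (ls : List String) (a b : Nat) :
    natSeg (l :: ls) (a + 1, b + 1) = natSeg ls (a, b) := by
  unfold natSeg
  simp only [List.getD_cons_succ, List.drop_succ_cons]
  have : b + 1 - (a + 1 + 1) = b - (a + 1) := by omega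
  rw [this]

theorem headD_map_succ (m : List Nat) (L : Nat) :
    (m.map (· + 1)).headD (L + 1) = m.headD L + 1 := by
  cases m <;> simp

theorem take_hN (ls : List String) :
    ls.take ((hN ls).headD ls.length) = ls.takeWhile (fun x => !isHdr x) := by
  induction ls with
  | nil => simp
  | cons x xs ih =>
    by_cases hx : isHdr x
    · simp [hN, hx]
    · rw [hN]
      simp only [hx, if_false, Bool.false_eq_true, List.nil_append, List.length_cons]
      rw [headD_map_succ, List.take_succ_cons, List.takeWhile_cons]
      simp only [hx, Bool.not_false, if_pos]
      rw [ih]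

theorem zip_shift (m : List Nat) (L : Nat) :
    (0 :: m.map (· + 1)).zip ((m ++ [L]).map (· + 1))
      = (0, m.headD L + 1) :: ((m.map (· + 1)).zip ((m.drop 1 ++ [L]).map (· + 1))) := by
  cases m <;> simp

-- B's index/slice segments are exactly the groups
theorem natZip_eq_groups (lines : List String) :
    (natZip lines).map (natSeg lines) = groups lines := by
  induction lines with
  | nil =>
    rw [show natZip [] = [] from rfl, List.map_nil, groups]
  | cons l ls ih =>
    by_cases h : isHdr l
    · have hz : natZip (l :: ls)
          = (0, (hN ls).headD ls.length + 1)
            :: (((hN ls).map (· + 1)).zip (((hN ls).drop 1 ++ [ls.length]).map (· + 1))) := by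
        unfold natZip
        rw [hN]
        simp only [h, if_true, List.singleton_append, List.length_cons, List.drop_succ_cons,
          List.drop_zero]
        rw [show ((hN ls).map (· + 1) ++ [ls.length + 1])
            = ((hN ls) ++ [ls.length]).map (· + 1) by rw [List.map_append]; rfl]
        exact zip_shift (hN ls) ls.length
      rw [hz, List.map_cons]
      have hhead : natSeg (l :: ls) (0, (hN ls).headD ls.length + 1)
          = (nameOf l, ls.takeWhile (fun x => !isHdr x)) := by
        unfold natSeg
        simp only [List.getD_cons_zero, List.drop_succ_cons, List.drop_zero,
          Nat.add_sub_cancel]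
        rw [take_hN]
      have htail : (((hN ls).map (· + 1)).zip (((hN ls).drop 1 ++ [ls.length]).map (· + 1))).map
            (natSeg (l :: ls))
          = groups (ls.dropWhile (fun x => !isHdr x)) := by
        rw [List.zip_map, List.map_map]
        have : (natZip ls).map (natSeg (l :: ls) ∘ Prod.map (· + 1) (· + 1))
            = (natZip ls).map (natSeg ls) := by
          refine List.map_congr_left ?_
          rintro ⟨a, b⟩ _
          exact natSeg_shift l ls a b
        rw [show ((hN ls).zip ((hN ls).drop 1 ++ [ls.length])) = natZip ls from rfl, this, ih,
          groups_dropWhile]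
      rw [hhead, htail, groups, if_pos h]
    · have hz : natZip (l :: ls)
          = (natZip ls).map (Prod.map (· + 1) (· + 1)) := by
        unfold natZip
        rw [hN]
        simp only [h, if_false, Bool.false_eq_true, List.nil_append, List.length_cons]
        rw [← List.map_drop,
          show ((hN ls).drop 1).map (· + 1) ++ [ls.length + 1]
            = ((hN ls).drop 1 ++ [ls.length]).map (· + 1) by
              rw [List.map_append]; rfl,
          List.zip_map]
      rw [hz, List.map_map]
      have : (natZip ls).map (natSeg (l :: ls) ∘ Prod.map (· + 1) (· + 1))
          = (natZip ls).map (natSeg ls) := by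
        refine List.map_congr_left ?_
        rintro ⟨a, b⟩ _
        exact natSeg_shift l ls a b
      rw [this, ih, groups, if_neg h]

-- B computes the same fold of gStep over the groups
theorem alt_eq (response : String) :
    parse_edit_instructions_alt response
      = ((groups ((PySem.Str.split? response "\n").getD [])).foldl gStep PySem.Dict.empty).items := by
  simp only [parse_edit_instructions_alt]
  refine congrArg PySem.Dict.items ?_
  set L : List String := (PySem.Str.split? response "\n").getD [] with hL
  rw [hI_eq]
  rw [show ((hN L).map (fun (n : Nat) => (n : Int))).drop 1 ++ [(L.length : Int)]
      = ((hN L).drop 1 ++ [L.length]).map (fun (n : Nat) => (n : Int)) by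
        rw [List.map_append, List.map_drop]; rfl]
  rw [List.zip_map, List.foldl_map, ← natZip_eq_groups, List.foldl_map]
  refine PySem.List.foldl_congr_mem _ _ _ _ ?_
  rintro d ⟨a, b⟩ hab
  have ha : a < L.length := hN_lt L a (List.of_mem_zip hab).1
  simp only [Prod.map]
  rw [PySem.List.pyGet?_natCast,
    show ((a : Int) + 1) = ((a + 1 : Nat) : Int) by push_cast; ring,
    PySem.List.slice_natCast]
  rw [← List.getD_eq_getElem?_getD]
  rfl

-- ===== VERDICT (by name: the statement is the Claim_ definition above) =====
theorem parse_edit_instructions_spec : Claim_equal_parse_edit_instructions := by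
  intro response _
  unfold Spec_parse_edit_instructions
  rw [alt_eq]
  unfold parse_edit_instructions
  rw [paLoop_eq]
  simp [paTruthy]
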